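-- pv_equiv track=rewrite | github.com/hyunlord/extract_logic | scripts/extractors/gdscript_formulas.py | _indent_size
-- ===== SOURCE A (Python) =====
-- def _indent_size(line: str) -> int:
--     size = 0
--     for ch in line:
--         if ch == " ":
--             size += 1
--         elif ch == "\t":
--             size += 4
--         else:
--             break
--     return size
-- ===== SOURCE B (Python) =====
-- def _indent_size(line: str) -> int:
--     # Extract the leading run of spaces/tabs first, then weight it.
--     prefix = line[:len(line) - len(line.lstrip(" \t"))]
--     return sum(4 if ch == "\t" else 1 for ch in prefix)
-- ===== Notes on version B (the rewrite author's own statement) =====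
-- stated objective: idiomatic
-- what changed: B separates extracting the space/tab indentation prefix (via lstrip-length arithmetic) from weighting it with a generator sum, instead of A's single accumulating loop with an early break.
import Mathlib
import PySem

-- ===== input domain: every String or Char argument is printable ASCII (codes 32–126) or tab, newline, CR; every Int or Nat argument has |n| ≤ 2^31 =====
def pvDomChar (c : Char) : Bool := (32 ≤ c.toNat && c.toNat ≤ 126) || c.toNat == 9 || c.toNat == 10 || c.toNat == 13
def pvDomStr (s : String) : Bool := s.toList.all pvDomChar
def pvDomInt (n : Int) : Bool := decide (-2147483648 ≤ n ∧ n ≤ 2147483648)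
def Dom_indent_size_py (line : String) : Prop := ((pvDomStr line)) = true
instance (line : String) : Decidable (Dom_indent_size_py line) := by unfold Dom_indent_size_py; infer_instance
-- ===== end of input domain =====

-- B extracts the space/tab prefix first (lstrip-length arithmetic) and then weights it,
-- instead of A's one accumulating loop with an early break (idiomatic decomposition, same cost).

-- ===== PORT A =====
-- 'for ch in line: … else: break' with the running size
def indentLoopA : List Char → Int → Int
  | [], size => size
  | ch :: rest, size =>
    if ch == ' ' then indentLoopA rest (size + 1)
    else if ch == '\t' then indentLoopA rest (size + 4)
    else size

def indent_size_py (line : String) : Int := indentLoopA line.toList 0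

-- ===== PORT B =====
def indent_size_py_alt (line : String) : Int :=
  let cs := line.toList
  -- line.lstrip(" \t") ported by hand as dropWhile over {' ', '\t'} (exact for this char set)
  let stripped := cs.dropWhile (fun c => c == ' ' || c == '\t')
  -- prefix = line[:len(line) - len(stripped)]
  let pre := PySem.List.slice cs none (some ((cs.length - stripped.length : Nat) : Int))
  (pre.map (fun ch => if ch == '\t' then (4 : Int) else 1)).sum

-- ===== PRECONDITION & SPEC =====
def Spec_indent_size_py (line : String) (out : Int) : Prop := out = indent_size_py_alt line
instance (line : String) (out : Int) : Decidable (Spec_indent_size_py line out) := by unfold Spec_indent_size_py; infer_instance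

-- ===== CLAIM (what is proved, stated in full; the proofs are below) =====
def Claim_equal_indent_size_py : Prop := ∀ (line : String), Dom_indent_size_py line → Spec_indent_size_py line (indent_size_py line)

-- ===== LEMMAS AND PROOFS =====

lemma indentLoopA_eq_takeWhile (cs : List Char) (size : Int) :
    indentLoopA cs size =
      size + ((cs.takeWhile (fun c => c == ' ' || c == '\t')).map
        (fun ch => if ch == '\t' then (4 : Int) else 1)).sum := by
  induction cs generalizing size with
  | nil => simp [indentLoopA]
  | cons c rest ih =>
    by_cases hsp : c = ' '
    · subst hsp
      simp [indentLoopA, ih]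
      ring
    · by_cases htb : c = '\t'
      · subst htb
        simp [indentLoopA, ih]
        ring
      · simp [indentLoopA, hsp, htb]

lemma take_sub_dropWhile (cs : List Char) (p : Char → Bool) :
    cs.take (cs.length - (cs.dropWhile p).length) = cs.takeWhile p := by
  have hlen : (cs.takeWhile p).length + (cs.dropWhile p).length = cs.length := by
    rw [← List.length_append, List.takeWhile_append_dropWhile]
  have h2 : cs.length - (cs.dropWhile p).length = (cs.takeWhile p).length := by omega
  rw [h2]
  obtain ⟨t, ht⟩ := List.takeWhile_prefix (l := cs) p
  rw [show cs.take (cs.takeWhile p).length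
      = (cs.takeWhile p ++ t).take (cs.takeWhile p).length from by rw [ht],
    List.take_left]

-- ===== VERDICT (by name: the statement is the Claim_ definition above) =====
theorem indent_size_py_spec : Claim_equal_indent_size_py := by
  intro line _
  unfold Spec_indent_size_py indent_size_py indent_size_py_alt
  simp only [PySem.List.slice_to_natCast]
  rw [take_sub_dropWhile, indentLoopA_eq_takeWhile]
  simp
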